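-- pv_equiv track=rewrite | github.com/MachineThought/FlyPig | spider/test.py | catch_price
-- ===== SOURCE A (Python) =====
-- def catch_price(day_item):
--     price = []
--     for item in day_item:
--         day_data = day_item[item]
--         for day in day_data:
--             min_price = day_data[day]["minPrice"]
--             price.append(min_price)
--     if len(price) <= 0:
--         return {}
--     return {"minPrice": min(price), "maxPrice": max(price)}
-- ===== SOURCE B (Python) =====
-- def catch_price(day_item):
--     lo = None
--     hi = None
--     for day_data in day_item.values():
--         for d in day_data.values():
--             v = d["minPrice"]
--             if lo is None:
--                 lo = v
--                 hi = v
--             else: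
--                 lo = min(lo, v)
--                 hi = max(hi, v)
--     if lo is None:
--         return {}
--     return {"minPrice": lo, "maxPrice": hi}
-- ===== Notes on version B (the rewrite author's own statement) =====
-- stated objective: simpler
-- what changed: B drops the intermediate price list and the key-indexed lookups: it iterates .values() directly and keeps running lo/hi accumulators seeded from the first value, instead of appending every minPrice to a list and calling min()/max() on it.
import Mathlib
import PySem

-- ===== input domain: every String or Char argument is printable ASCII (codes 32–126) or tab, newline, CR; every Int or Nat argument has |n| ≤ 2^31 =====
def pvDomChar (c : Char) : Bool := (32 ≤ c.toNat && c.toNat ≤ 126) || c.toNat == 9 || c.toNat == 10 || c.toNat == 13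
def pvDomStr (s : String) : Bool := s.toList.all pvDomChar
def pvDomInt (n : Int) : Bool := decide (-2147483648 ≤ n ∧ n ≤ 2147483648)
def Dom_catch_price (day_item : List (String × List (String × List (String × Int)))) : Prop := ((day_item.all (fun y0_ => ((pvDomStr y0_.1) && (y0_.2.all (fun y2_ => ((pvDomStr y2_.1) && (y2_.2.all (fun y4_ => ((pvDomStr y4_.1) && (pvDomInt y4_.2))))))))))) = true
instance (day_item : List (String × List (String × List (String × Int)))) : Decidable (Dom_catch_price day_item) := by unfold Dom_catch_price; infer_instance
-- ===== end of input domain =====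

-- B drops the intermediate price list: it scans the values directly with running lo/hi accumulators (simpler, O(1) extra space).


-- ===== PORT A =====
-- 'for item in day_item: day_data = day_item[item]' iterates the dict's keys and looks each one up;
-- the .getD defaults are never reached under Pre_ (keys come from the dict itself, "minPrice" is required present).
def catch_price (day_item : List (String × List (String × List (String × Int)))) : List (String × Int) :=
  let price : List Int := day_item.foldl (fun acc item =>
    let day_data := ((PySem.Dict.mk day_item).get? item.1).getD []
    day_data.foldl (fun acc2 day =>
      let min_price := ((PySem.Dict.mk (((PySem.Dict.mk day_data).get? day.1).getD [])).get? "minPrice").getD 0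
      acc2 ++ [min_price]) acc) []
  if price.length ≤ 0 then []
  else [("minPrice", (PySem.List.min? price (fun x => x)).getD 0),
        ("maxPrice", (PySem.List.max? price (fun x => x)).getD 0)]

-- ===== PORT B =====
def catch_price_alt (day_item : List (String × List (String × List (String × Int)))) : List (String × Int) :=
  let st : Option (Int × Int) := day_item.foldl (fun st day_data =>
    day_data.2.foldl (fun st d =>
      let v := ((PySem.Dict.mk d.2).get? "minPrice").getD 0
      match st with
      | none => some (v, v)
      | some (lo, hi) => some (min lo v, max hi v)) st) none
  match st with
  | none => []
  | some (lo, hi) => [("minPrice", lo), ("maxPrice", hi)]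

-- ===== PRECONDITION & SPEC =====
-- Pre_ excludes (a) assoc lists with duplicate keys at the two dict levels, which do not represent a Python
-- dict (the argument is a dict of dicts), and (b) inner dicts missing the "minPrice" key, on which A raises KeyError.
def Pre_catch_price (day_item : List (String × List (String × List (String × Int)))) : Prop :=
  (day_item.map (·.1)).Nodup ∧
  ∀ p ∈ day_item, (p.2.map (·.1)).Nodup ∧ ∀ q ∈ p.2, "minPrice" ∈ q.2.map (·.1)
instance (day_item : List (String × List (String × List (String × Int)))) : Decidable (Pre_catch_price day_item) := by unfold Pre_catch_price; infer_instance
def pvWitness_catch_price : (List (String × List (String × List (String × Int)))) :=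
  [("a", [("mon", [("minPrice", 3)]), ("tue", [("minPrice", 7)])]), ("b", [("wed", [("minPrice", 5)])])]
def Spec_catch_price (day_item : List (String × List (String × List (String × Int)))) (out : List (String × Int)) : Prop := out = catch_price_alt day_item
instance (day_item : List (String × List (String × List (String × Int)))) (out : List (String × Int)) : Decidable (Spec_catch_price day_item out) := by unfold Spec_catch_price; infer_instance

-- ===== CLAIM (what is proved, stated in full; the proofs are below) =====
def Claim_equal_catch_price : Prop := ∀ (day_item : List (String × List (String × List (String × Int)))), Dom_catch_price day_item → Pre_catch_price day_item → Spec_catch_price day_item (catch_price day_item)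

-- ===== LEMMAS AND PROOFS =====

-- the value read from one inner dict
def pvVal (q : String × List (String × Int)) : Int := ((PySem.Dict.mk q.2).get? "minPrice").getD 0
-- all values, in traversal order
def pvVals (day_item : List (String × List (String × List (String × Int)))) : List Int :=
  day_item.flatMap (fun p => p.2.map pvVal)
-- B's step
def pvUpd (st : Option (Int × Int)) (v : Int) : Option (Int × Int) :=
  match st with
  | none => some (v, v)
  | some (lo, hi) => some (min lo v, max hi v)

theorem pvUpd_some (t : List Int) (lo hi : Int) :
    t.foldl pvUpd (some (lo, hi)) = some (t.foldl min lo, t.foldl max hi) := by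
  induction t generalizing lo hi with
  | nil => rfl
  | cons v t ih => simpa [pvUpd] using ih (min lo v) (max hi v)

theorem get?_self_of_nodup {ν : Type} (l : List (String × ν)) (h : (l.map (·.1)).Nodup)
    (p : String × ν) (hp : p ∈ l) : (PySem.Dict.mk l).get? p.1 = some p.2 := by
  exact PySem.Dict.get?_of_mem_items (d := PySem.Dict.mk l) hp h

theorem pvInnerA (dd : List (String × List (String × Int))) (h : (dd.map (·.1)).Nodup)
    (acc : List Int) :
    dd.foldl (fun acc2 day =>
      acc2 ++ [((PySem.Dict.mk (((PySem.Dict.mk dd).get? day.1).getD [])).get? "minPrice").getD 0]) acc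
    = acc ++ dd.map pvVal := by
  have hstep : ∀ q ∈ dd, ∀ acc2 : List Int,
      acc2 ++ [((PySem.Dict.mk (((PySem.Dict.mk dd).get? q.1).getD [])).get? "minPrice").getD 0]
      = acc2 ++ [pvVal q] := by
    intro q hq acc2
    rw [get?_self_of_nodup dd h q hq]
    rfl
  rw [PySem.List.foldl_congr_mem'
      (f := fun acc2 day =>
        acc2 ++ [((PySem.Dict.mk (((PySem.Dict.mk dd).get? day.1).getD [])).get? "minPrice").getD 0])
      (g := fun acc2 q => acc2 ++ [pvVal q])
      (h := hstep)]
  exact PySem.List.foldl_append_singleton_eq_map _ _ _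

theorem pvA_price (day_item : List (String × List (String × List (String × Int))))
    (hnd : (day_item.map (·.1)).Nodup)
    (hmid : ∀ p ∈ day_item, (p.2.map (·.1)).Nodup) :
    day_item.foldl (fun acc item =>
      let day_data := ((PySem.Dict.mk day_item).get? item.1).getD []
      day_data.foldl (fun acc2 day =>
        let min_price := ((PySem.Dict.mk (((PySem.Dict.mk day_data).get? day.1).getD [])).get? "minPrice").getD 0
        acc2 ++ [min_price]) acc) ([] : List Int) = pvVals day_item := by
  have hstep : ∀ p ∈ day_item, ∀ acc : List Int,
      (let day_data := ((PySem.Dict.mk day_item).get? p.1).getD []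
       day_data.foldl (fun acc2 day =>
         let min_price := ((PySem.Dict.mk (((PySem.Dict.mk day_data).get? day.1).getD [])).get? "minPrice").getD 0
         acc2 ++ [min_price]) acc)
      = acc ++ p.2.map pvVal := by
    intro p hp acc
    have hdd : ((PySem.Dict.mk day_item).get? p.1).getD [] = p.2 := by
      rw [get?_self_of_nodup day_item hnd p hp]; rfl
    show (((PySem.Dict.mk day_item).get? p.1).getD []).foldl (fun acc2 day =>
        acc2 ++ [((PySem.Dict.mk (((PySem.Dict.mk (((PySem.Dict.mk day_item).get? p.1).getD [])).get? day.1).getD [])).get? "minPrice").getD 0]) acc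
      = acc ++ p.2.map pvVal
    rw [hdd]
    exact pvInnerA p.2 (hmid p hp) acc
  refine (PySem.List.foldl_congr_mem' _ _ (fun acc p => acc ++ p.2.map pvVal) _ hstep).trans ?_
  rw [PySem.List.foldl_append_eq_flatMap]
  rfl

theorem pvB_state (day_item : List (String × List (String × List (String × Int))))
    (st0 : Option (Int × Int)) :
    day_item.foldl (fun st day_data =>
      day_data.2.foldl (fun st d => pvUpd st (((PySem.Dict.mk d.2).get? "minPrice").getD 0)) st) st0
    = (pvVals day_item).foldl pvUpd st0 := by
  induction day_item generalizing st0 with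
  | nil => rfl
  | cons p t ih =>
      simp only [List.foldl_cons, pvVals, List.flatMap_cons, List.foldl_append, List.foldl_map]
      rw [ih]
      rfl

theorem catch_price_spec' (day_item : List (String × List (String × List (String × Int))))
    (hpre : Pre_catch_price day_item) :
    catch_price day_item = catch_price_alt day_item := by
  obtain ⟨hnd, hmid⟩ := hpre
  unfold catch_price catch_price_alt
  rw [pvA_price day_item hnd (fun p hp => (hmid p hp).1)]
  rw [show (day_item.foldl (fun st day_data =>
      day_data.2.foldl (fun st d =>
        let v := ((PySem.Dict.mk d.2).get? "minPrice").getD 0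
        match st with
        | none => some (v, v)
        | some (lo, hi) => some (min lo v, max hi v)) st)
      (none : Option (Int × Int))) = (pvVals day_item).foldl pvUpd none from
      pvB_state day_item none]
  cases hvs : pvVals day_item with
  | nil => rfl
  | cons v t =>
      simp only [List.foldl_cons, pvUpd, pvUpd_some t v v, List.length_cons,
        PySem.List.min?_id_cons, PySem.List.max?_id_cons, Option.getD_some]
      norm_num

-- ===== VERDICT (by name: the statement is the Claim_ definition above) =====
theorem catch_price_spec : Claim_equal_catch_price := by
  intro d _ hpre
  exact catch_price_spec' d hpre
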